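-- pv_equiv track=rewrite | github.com/wyk18703232953/myResearch | codeComplex/data/filteredData/python/linear/python_linear_0137.py | build_dp
-- ===== SOURCE A (Python) =====
-- def build_dp(limit=1100):
--     dp = [0] * (limit + 1)
--     dp[1] = 1
--     for i in range(2, len(dp)):
--         o = bin(i).count("1")
--         if o == 1:
--             dp[i] = 2
--         else:
--             dp[i] = dp[o] + 1
--     return dp
-- ===== SOURCE B (Python) =====
-- def build_dp(limit=1100):
--     dp = [0] * (limit + 1)
--     dp[1] = 1
--     for i in range(2, len(dp)):
--         x = i
--         steps = 0
--         while x != 1: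
--             x = bin(x).count("1")
--             steps += 1
--         dp[i] = steps + 1
--     return dp
-- ===== Notes on version B (the rewrite author's own statement) =====
-- stated objective: alternative
-- what changed: Replaces the DP recurrence dp[i] = dp[popcount(i)] + 1 (table reuse) by an independent per-entry walk of the popcount chain down to 1, so no dp cell is ever read.
import Mathlib
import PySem

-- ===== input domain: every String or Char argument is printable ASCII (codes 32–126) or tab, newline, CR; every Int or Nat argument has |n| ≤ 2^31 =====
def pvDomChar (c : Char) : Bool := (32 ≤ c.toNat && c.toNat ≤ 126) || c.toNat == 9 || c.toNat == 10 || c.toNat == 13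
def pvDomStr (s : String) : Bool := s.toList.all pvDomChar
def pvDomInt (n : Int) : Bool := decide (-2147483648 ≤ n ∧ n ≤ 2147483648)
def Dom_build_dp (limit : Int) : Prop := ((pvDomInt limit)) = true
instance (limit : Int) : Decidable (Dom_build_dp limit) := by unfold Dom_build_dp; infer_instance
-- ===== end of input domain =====

-- B recomputes each dp[i] by walking the popcount chain instead of reusing the dp table (alternative decomposition; same cost).

-- ===== PORT A =====
def build_dp (limit : Int) : List Int :=
  let dp := List.replicate (limit + 1).toNat (0 : Int)
  -- dp[1] = 1 : Python raises IndexError when limit ≤ 0; those inputs are excluded by Pre_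
  let dp := PySem.List.pySetD dp 1 1
  (PySem.List.pyRange 2 (dp.length : Int) 1).foldl
    (fun dp i =>
      let o : Int := PySem.Int.bitCount i      -- bin(i).count("1")
      if o = 1 then PySem.List.pySetD dp i 2
      else PySem.List.pySetD dp i (PySem.List.pyGetD dp o 0 + 1)) dp

-- ===== PORT B =====
-- termination fact for the while-loop helper, cited by chainSteps's decreasing_by
theorem pvBitCount_le_self (m : Nat) : PySem.Int.bitCount (m : Int) ≤ m := by
  induction m using Nat.strong_induction_on with
  | _ m ih =>
    rcases Nat.eq_zero_or_pos m with h | h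
    · simp [h]
    · rw [PySem.Int.bitCount_natCast h]
      have := ih (m / 2) (by omega)
      omega

theorem pvBitCount_lt_self (m : Nat) (h : 2 ≤ m) : PySem.Int.bitCount (m : Int) < m := by
  rw [PySem.Int.bitCount_natCast (show 0 < m by omega)]
  have := pvBitCount_le_self (m / 2)
  omega

-- 'while x != 1: x = bin(x).count("1"); steps += 1' — the guard is written '2 ≤ x' so the
-- function is total; Python's loop is only entered with x ≥ 2 (bitCount of a positive int is ≥ 1).
def chainSteps (x : Int) : Nat :=
  if h : 2 ≤ x then chainSteps (PySem.Int.bitCount x : Int) + 1 else 0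
termination_by x.toNat
decreasing_by
  have hx : x = ((x.toNat : Nat) : Int) := by omega
  have : PySem.Int.bitCount x < x.toNat := by
    rw [hx]; exact pvBitCount_lt_self x.toNat (by omega)
  omega

def build_dp_alt (limit : Int) : List Int :=
  let dp := List.replicate (limit + 1).toNat (0 : Int)
  let dp := PySem.List.pySetD dp 1 1
  (PySem.List.pyRange 2 (dp.length : Int) 1).foldl
    (fun dp i => PySem.List.pySetD dp i ((chainSteps i : Int) + 1)) dp

-- ===== PRECONDITION & SPEC =====
-- Python A raises IndexError at dp[1] = 1 whenever limit ≤ 0 (the list has length < 2)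
def Pre_build_dp (limit : Int) : Prop := 1 ≤ limit
instance (limit : Int) : Decidable (Pre_build_dp limit) := by unfold Pre_build_dp; infer_instance
def pvWitness_build_dp : Int := (5)

def Spec_build_dp (limit : Int) (out : List Int) : Prop := out = build_dp_alt limit
instance (limit : Int) (out : List Int) : Decidable (Spec_build_dp limit out) := by unfold Spec_build_dp; infer_instance

-- ===== CLAIM (what is proved, stated in full; the proofs are below) =====
def Claim_equal_build_dp : Prop := ∀ (limit : Int), Dom_build_dp limit → Pre_build_dp limit → Spec_build_dp limit (build_dp limit)

-- ===== LEMMAS AND PROOFS =====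

-- the value ultimately stored at index j (0 at index 0, chain length + 1 elsewhere)
def pvVal (j : Nat) : Int := if j = 0 then 0 else (chainSteps (j : Int) : Nat) + 1

-- dp after the loop has processed indices 2..n-1 (length L, cells < n final, cells ≥ n still initial)
def pvMix (L n : Nat) : List Int := (List.range L).map (fun j => if j < n then pvVal j else 0)

theorem pvChain_one : chainSteps 1 = 0 := by rw [chainSteps]; simp

theorem pvChain_step (n : Nat) (h : 2 ≤ n) :
    chainSteps (n : Int) = chainSteps ((PySem.Int.bitCount (n : Int) : Nat) : Int) + 1 := by
  rw [chainSteps]; simp [show (2:Int) ≤ (n:Int) by exact_mod_cast h]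

theorem pvBitCount_pos (n : Nat) (h : 1 ≤ n) : 1 ≤ PySem.Int.bitCount (n : Int) := by
  induction n using Nat.strong_induction_on with
  | _ n ih =>
    rw [PySem.Int.bitCount_natCast (show 0 < n by omega)]
    rcases Nat.eq_zero_or_pos (n % 2) with h2 | h2
    · have := ih (n / 2) (by omega) (by omega)
      omega
    · omega

theorem pvLen_mix (L n : Nat) : (pvMix L n).length = L := by simp [pvMix]

theorem pvGet_mix (L n j : Nat) (hj : j < L) :
    (pvMix L n)[j]'(by simp [pvLen_mix, hj]) = if j < n then pvVal j else 0 := by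
  simp [pvMix]

theorem pvD0_eq (L : Nat) (hL : 2 ≤ L) :
    PySem.List.pySetD (List.replicate L (0 : Int)) 1 1 = pvMix L 2 := by
  rw [PySem.List.pySetD_of_nonneg _ _ (by omega)]
  apply List.ext_getElem
  · simp [pvLen_mix]
  · intro j h1 h2
    rw [pvGet_mix L 2 j (by simpa [pvLen_mix] using h2)]
    rw [List.getElem_set]
    simp only [List.getElem_replicate]
    rcases Nat.lt_or_ge j 2 with hj | hj
    · interval_cases j <;> simp [pvVal, pvChain_one]
    · simp [show ¬ ((1:Nat) = j) by omega, show ¬ j < 2 by omega]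

theorem pvSet_mix (L n : Nat) (_h2 : 2 ≤ n) (hn : n < L) (v : Int) (hv : v = pvVal n) :
    PySem.List.pySetD (pvMix L n) (n : Int) v = pvMix L (n + 1) := by
  rw [PySem.List.pySetD_natCast]
  apply List.ext_getElem
  · simp [pvLen_mix]
  · intro j hj1 hj2
    have hjL : j < L := by simpa [pvLen_mix] using hj2
    rw [pvGet_mix L (n+1) j hjL, List.getElem_set, pvGet_mix L n j hjL]
    rcases Nat.lt_trichotomy j n with h | h | h
    · simp [show ¬ n = j by omega, h, show j < n + 1 by omega]
    · simp [h, hv]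
    · simp [show ¬ n = j by omega, show ¬ j < n by omega, show ¬ j < n + 1 by omega]

theorem pvStepB (L n : Nat) (h2 : 2 ≤ n) (hn : n < L) :
    PySem.List.pySetD (pvMix L n) (n : Int) ((chainSteps (n : Int) : Int) + 1) = pvMix L (n + 1) := by
  apply pvSet_mix L n h2 hn
  simp [pvVal, show ¬ n = 0 by omega]

theorem pvStepA (L n : Nat) (h2 : 2 ≤ n) (hn : n < L) :
    (if (PySem.Int.bitCount (n : Int) : Int) = 1 then
        PySem.List.pySetD (pvMix L n) (n : Int) 2
      else
        PySem.List.pySetD (pvMix L n) (n : Int)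
          (PySem.List.pyGetD (pvMix L n) (PySem.Int.bitCount (n : Int) : Int) 0 + 1))
      = pvMix L (n + 1) := by
  have ho1 : 1 ≤ PySem.Int.bitCount (n : Int) := pvBitCount_pos n (by omega)
  have hon : PySem.Int.bitCount (n : Int) < n := pvBitCount_lt_self n h2
  by_cases h1 : PySem.Int.bitCount (n : Int) = 1
  · rw [if_pos (by exact_mod_cast h1)]
    apply pvSet_mix L n h2 hn
    simp [pvVal, show ¬ n = 0 by omega, pvChain_step n h2, h1, pvChain_one]
  · rw [if_neg (by exact_mod_cast h1)]
    apply pvSet_mix L n h2 hn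
    have hget : PySem.List.pyGetD (pvMix L n) ((PySem.Int.bitCount (n : Int) : Nat) : Int) 0
        = pvVal (PySem.Int.bitCount (n : Int)) := by
      rw [PySem.List.pyGetD_natCast]
      have hlt : PySem.Int.bitCount (n : Int) < (pvMix L n).length := by rw [pvLen_mix]; omega
      rw [List.getD_eq_getElem _ _ hlt, pvGet_mix L n _ (by rw [pvLen_mix] at hlt; omega)]
      simp [hon]
    rw [hget]
    simp only [pvVal, show ¬ n = 0 by omega, show ¬ PySem.Int.bitCount (n : Int) = 0 by omega,
      pvChain_step n h2]
    push_cast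
    ring

theorem pvFoldA (L : Nat) (_hL : 2 ≤ L) : ∀ n, 2 ≤ n → n ≤ L →
    (PySem.List.pyRange 2 (n : Int) 1).foldl
      (fun dp i =>
        if (PySem.Int.bitCount i : Int) = 1 then PySem.List.pySetD dp i 2
        else PySem.List.pySetD dp i (PySem.List.pyGetD dp (PySem.Int.bitCount i : Int) 0 + 1)) (pvMix L 2)
      = pvMix L n := by
  intro n hn
  induction n, hn using Nat.le_induction with
  | base =>
    intro _
    rw [PySem.List.pyRange_one_eq_nil (by norm_num)]
    simp
  | succ n hn ih =>
    intro hnL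
    have hc : ((n + 1 : Nat) : Int) = (n : Int) + 1 := by push_cast; ring
    rw [hc, PySem.List.pyRange_one_succ_right (by exact_mod_cast hn)]
    rw [List.foldl_append, ih (by omega)]
    simpa using pvStepA L n hn (by omega)

theorem pvFoldB (L : Nat) (_hL : 2 ≤ L) : ∀ n, 2 ≤ n → n ≤ L →
    (PySem.List.pyRange 2 (n : Int) 1).foldl
      (fun dp i => PySem.List.pySetD dp i ((chainSteps i : Int) + 1)) (pvMix L 2)
      = pvMix L n := by
  intro n hn
  induction n, hn using Nat.le_induction with
  | base =>
    intro _
    rw [PySem.List.pyRange_one_eq_nil (by norm_num)]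
    simp
  | succ n hn ih =>
    intro hnL
    have hc : ((n + 1 : Nat) : Int) = (n : Int) + 1 := by push_cast; ring
    rw [hc, PySem.List.pyRange_one_succ_right (by exact_mod_cast hn)]
    rw [List.foldl_append, ih (by omega)]
    simpa using pvStepB L n hn (by omega)

-- ===== VERDICT (by name: the statement is the Claim_ definition above) =====
theorem build_dp_spec : Claim_equal_build_dp := by
  intro limit _ hpre
  unfold Spec_build_dp build_dp build_dp_alt
  have hL : 2 ≤ (limit + 1).toNat := by unfold Pre_build_dp at hpre; omega
  set L : Nat := (limit + 1).toNat with hLdef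
  simp only [pvD0_eq L hL, pvLen_mix]
  rw [pvFoldA L hL L hL (le_refl L), pvFoldB L hL L hL (le_refl L)]
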